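-- pv_equiv track=rewrite | github.com/JabColV/ProyectoADAII | dinamico.py | calcular_costo_total
-- ===== SOURCE A (Python) =====
-- memoization = dict([])
--
-- def finca_string(finca):
--   respuesta = "["
--   for i in finca:
--     respuesta += "[" + str(i[0]) + "," + str(i[1]) + "," + str(i[2]) + "]"
--   respuesta += "]"
--   return respuesta
--
-- def calcular_costo_por_tablon(tablon,tiempo_transcurrido):
--   tiempo_supervivencia, tiempo_riego, prioridad = tablon
--   if (tiempo_supervivencia - tiempo_riego >= tiempo_transcurrido):
--     return tiempo_supervivencia - (tiempo_transcurrido + tiempo_riego)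
--   else:
--     return prioridad * ((tiempo_transcurrido + tiempo_riego) - tiempo_supervivencia)
--
-- def calcular_costo_total(finca):
--   costo_total = 0
--   tiempo_trans = 0
--   key = finca_string(finca)
--   if memoization.get(key):
--     return memoization[key]
--   else:
--     for i in finca:
--       costo_total += calcular_costo_por_tablon(i, tiempo_trans)
--       tiempo_trans += i[1]
--     memoization[key] = costo_total
--     return costo_total
-- ===== SOURCE B (Python) =====
-- def calcular_costo_total(finca):
--   # Divide and conquer: a plot irrigated after elapsed time t costs the same as
--   # the plot with survival time s - t irrigated at time 0, so the right half can
--   # be solved independently after shifting it by the left half's total duration.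
--   if not finca:
--     return 0
--   if len(finca) == 1:
--     s, r, p = finca[0]
--     return s - r if s >= r else p * (r - s)
--   mid = len(finca) // 2
--   left, right = finca[:mid], finca[mid:]
--   t = sum(r for _, r, _ in left)
--   return calcular_costo_total(left) + calcular_costo_total([(s - t, r, p) for s, r, p in right])
-- ===== Notes on version B (the rewrite author's own statement) =====
-- stated objective: alternative
-- what changed: Replaced A's single pass with a running (cost, elapsed-time) accumulator (plus a string-key memo cache that only caches) by a divide-and-conquer recursion: split the list in half, recurse on the left, and recurse on the right after shifting each plot's survival time by the left half's total irrigation time, summing the two results.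
import Mathlib
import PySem

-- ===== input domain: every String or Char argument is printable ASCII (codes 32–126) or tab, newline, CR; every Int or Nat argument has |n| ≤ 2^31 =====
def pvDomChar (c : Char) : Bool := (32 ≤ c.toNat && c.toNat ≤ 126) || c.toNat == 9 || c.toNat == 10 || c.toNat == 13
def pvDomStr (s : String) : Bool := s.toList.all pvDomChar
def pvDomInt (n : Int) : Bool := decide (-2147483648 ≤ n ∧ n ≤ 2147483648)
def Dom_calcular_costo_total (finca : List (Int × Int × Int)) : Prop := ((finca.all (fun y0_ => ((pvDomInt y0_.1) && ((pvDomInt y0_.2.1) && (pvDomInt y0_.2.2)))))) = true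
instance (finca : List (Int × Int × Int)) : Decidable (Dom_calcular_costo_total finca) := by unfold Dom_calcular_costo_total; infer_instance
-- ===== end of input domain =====

-- B replaces A's single accumulator pass (and its string-key memo cache, which only caches the
-- same value) by a divide-and-conquer recursion that shifts the right half's survival times.

-- ===== PORT A =====
-- helper calcular_costo_por_tablon
def calcular_costo_por_tablon (tablon : Int × Int × Int) (tiempo_transcurrido : Int) : Int :=
  if tablon.1 - tablon.2.1 ≥ tiempo_transcurrido then
    tablon.1 - (tiempo_transcurrido + tablon.2.1)
  else
    tablon.2.2 * ((tiempo_transcurrido + tablon.2.1) - tablon.1)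

-- A's loop: running (costo_total, tiempo_trans) accumulator. The module-level memoization dict
-- only caches the same value and cannot be observed in the return value; the port is the pure loop.
def calcular_costo_total (finca : List (Int × Int × Int)) : Int :=
  (finca.foldl (fun st i => (st.1 + calcular_costo_por_tablon i st.2, st.2 + i.2.1)) ((0 : Int), (0 : Int))).1

-- ===== PORT B =====
-- the right-half comprehension [(s - t, r, p) for s, r, p in right]
def pvShift (t : Int) (l : List (Int × Int × Int)) : List (Int × Int × Int) :=
  l.map (fun x => (x.1 - t, x.2.1, x.2.2))

-- the recursion of Source B, totalized with a fuel bound (fuel ≥ length at every call;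
-- the fuel-exhausted branch is unreachable)
def pvAltGo : Nat → List (Int × Int × Int) → Int
  | _, [] => 0
  | _, [x] => if x.1 ≥ x.2.1 then x.1 - x.2.1 else x.2.2 * (x.2.1 - x.1)
  | 0, _ :: _ :: _ => 0
  | fuel + 1, a :: b :: rest =>
    let mid := (a :: b :: rest).length / 2
    let left := (a :: b :: rest).take mid
    let right := (a :: b :: rest).drop mid
    let t := (left.map (fun x => x.2.1)).sum
    pvAltGo fuel left + pvAltGo fuel (pvShift t right)

def calcular_costo_total_alt (finca : List (Int × Int × Int)) : Int :=
  pvAltGo finca.length finca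

-- ===== PRECONDITION & SPEC =====
def Spec_calcular_costo_total (finca : List (Int × Int × Int)) (out : Int) : Prop := out = calcular_costo_total_alt finca
instance (finca : List (Int × Int × Int)) (out : Int) : Decidable (Spec_calcular_costo_total finca out) := by unfold Spec_calcular_costo_total; infer_instance

-- ===== CLAIM (what is proved, stated in full; the proofs are below) =====
def Claim_equal_calcular_costo_total : Prop := ∀ (finca : List (Int × Int × Int)), Dom_calcular_costo_total finca → Spec_calcular_costo_total finca (calcular_costo_total finca)

-- ===== LEMMAS AND PROOFS =====

-- abbreviation for A's loop step
def pvStep (st : Int × Int) (i : Int × Int × Int) : Int × Int :=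
  (st.1 + calcular_costo_por_tablon i st.2, st.2 + i.2.1)

lemma pv_fold_fst (l : List (Int × Int × Int)) : ∀ a t : Int,
    (l.foldl pvStep (a, t)).1 = a + (l.foldl pvStep (0, t)).1 := by
  induction l with
  | nil => intro a t; simp
  | cons x xs ih =>
    intro a t
    simp only [List.foldl_cons, pvStep]
    rw [ih, ih (0 + calcular_costo_por_tablon x t)]
    ring

lemma pv_fold_snd (l : List (Int × Int × Int)) : ∀ a t : Int,
    (l.foldl pvStep (a, t)).2 = t + (l.map (fun x => x.2.1)).sum := by
  induction l with
  | nil => intro a t; simp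
  | cons x xs ih => intro a t; simp only [List.foldl_cons, pvStep, List.map_cons, List.sum_cons]; rw [ih]; ring

lemma pv_cost_shift (x : Int × Int × Int) (t u : Int) :
    calcular_costo_por_tablon (x.1 - t, x.2.1, x.2.2) u = calcular_costo_por_tablon x (t + u) := by
  unfold calcular_costo_por_tablon
  simp only
  split_ifs with h1 h2 h2
  · omega
  · omega
  · omega
  · ring

lemma pv_fold_shift (l : List (Int × Int × Int)) : ∀ t u : Int,
    ((pvShift t l).foldl pvStep (0, u)).1 = (l.foldl pvStep (0, t + u)).1 := by
  induction l with
  | nil => intro t u; simp [pvShift]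
  | cons x xs ih =>
    intro t u
    simp only [pvShift, List.map_cons, List.foldl_cons, pvStep]
    rw [pv_fold_fst, pv_fold_fst, pv_cost_shift]
    have h : ((xs.map (fun x => (x.1 - t, x.2.1, x.2.2))).foldl pvStep (0, u + x.2.1)).1
        = (xs.foldl pvStep (0, t + (u + x.2.1))).1 := by
      have := ih t (u + x.2.1); simpa [pvShift] using this
    rw [h, show t + (u + x.2.1) = t + u + x.2.1 from by ring]
    conv_rhs => rw [pv_fold_fst]
    ring

lemma pv_go_eq_fold : ∀ fuel (l : List (Int × Int × Int)), l.length ≤ fuel →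
    pvAltGo fuel l = (l.foldl pvStep (0, 0)).1 := by
  intro fuel
  induction fuel with
  | zero =>
    intro l hl
    have : l = [] := List.eq_nil_of_length_eq_zero (Nat.le_zero.mp hl)
    subst this; simp [pvAltGo]
  | succ n ih =>
    intro l hl
    match l with
    | [] => simp [pvAltGo]
    | [x] =>
      simp only [pvAltGo, List.foldl_cons, List.foldl_nil, pvStep,
        calcular_costo_por_tablon, zero_add]
      split_ifs with h1 h2 h2 <;> first | rfl | omega
    | a :: b :: xs =>
      rw [pvAltGo]
      set L : List (Int × Int × Int) := a :: b :: xs with hL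
      have hlen : 2 ≤ L.length := by simp [hL]
      set mid := L.length / 2 with hmid
      have hmid1 : 1 ≤ mid := by omega
      have hmidlt : mid < L.length := by omega
      have htake : (L.take mid).length = mid := by simp; omega
      have hdrop : (L.drop mid).length = L.length - mid := by simp
      have hln : L.length ≤ n + 1 := hl
      have h1 : pvAltGo n (L.take mid) = ((L.take mid).foldl pvStep (0, 0)).1 := by
        apply ih; omega
      have h2 : pvAltGo n (pvShift ((L.take mid).map (fun x => x.2.1)).sum (L.drop mid))
          = ((pvShift ((L.take mid).map (fun x => x.2.1)).sum (L.drop mid)).foldl pvStep (0, 0)).1 := by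
        apply ih; simp only [pvShift, List.length_map, hdrop]; omega
      rw [h1, h2, pv_fold_shift,
        show ((L.take mid).map (fun x => x.2.1)).sum + 0 = ((L.take mid).map (fun x => x.2.1)).sum from by ring]
      conv_rhs => rw [← List.take_append_drop mid L]
      rw [List.foldl_append]
      have hpair : (L.take mid).foldl pvStep (0, 0)
          = (((L.take mid).foldl pvStep (0, 0)).1, ((L.take mid).map (fun x => x.2.1)).sum) := by
        refine Prod.ext rfl ?_
        rw [pv_fold_snd]; ring
      rw [hpair]
      conv_rhs => rw [pv_fold_fst]

-- ===== VERDICT (by name: the statement is the Claim_ definition above) =====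
theorem calcular_costo_total_spec : Claim_equal_calcular_costo_total := by
  intro finca _
  unfold Spec_calcular_costo_total calcular_costo_total
  have := pv_go_eq_fold finca.length finca le_rfl
  unfold calcular_costo_total_alt
  rw [this]
  rfl
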